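-- pv_equiv track=rewrite | github.com/kmu-cs-swp2-2018/class-04-ganghe74 | 라이브코딩/2차_5.py | solution
-- ===== SOURCE A (Python) =====
-- def different(s1, s2):
--     answer = 0
--     s1 = s1.lower()
--     s2 = s2.lower()
--     for i in range(len(s1)):
--         if s1[i] == s2[i]:
--             answer += 1
--     return answer
--
-- def solution(s, l):
--     answer = []
--     high = 0
--     for x in l:
--         diff = different(s, x)
--         if diff > high:
--             high = diff
--             answer = [x]
--         elif diff == high:
--             answer.append(x)
--     return answer
-- ===== SOURCE B (Python) =====
-- def solution(s, l):
--     t = s.lower()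
--     scores = [sum(a == b for a, b in zip(t, x.lower())) for x in l]
--     if not l:
--         return []
--     best = max(scores)
--     return [x for x, sc in zip(l, scores) if sc == best]
-- ===== Notes on version B (the rewrite author's own statement) =====
-- stated objective: simpler
-- what changed: Replaces the running-max-with-reset accumulation (helper different with an index loop and a mutable answer list) by score-list + max + one filtering comprehension, lowercasing s once and counting matches over zip.
import Mathlib
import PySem

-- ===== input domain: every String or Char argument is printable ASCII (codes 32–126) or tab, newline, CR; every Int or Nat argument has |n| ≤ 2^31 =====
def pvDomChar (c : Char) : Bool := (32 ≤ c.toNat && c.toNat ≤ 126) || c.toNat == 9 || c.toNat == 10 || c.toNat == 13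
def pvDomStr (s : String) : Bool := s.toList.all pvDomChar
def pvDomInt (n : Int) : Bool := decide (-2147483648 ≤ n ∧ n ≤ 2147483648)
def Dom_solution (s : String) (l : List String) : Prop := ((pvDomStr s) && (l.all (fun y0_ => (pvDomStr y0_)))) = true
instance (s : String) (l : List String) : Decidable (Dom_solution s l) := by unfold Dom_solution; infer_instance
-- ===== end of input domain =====

-- B replaces A's running-max-with-reset loop by score list + max + filter; return values agree wherever A returns.

-- ===== PORT A =====
-- different(s1, s2): lowercase both, count equal positions over range(len(s1)); s2[i] raises when s2 is shorter (excluded by Pre_)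
def pyDifferent (s1 s2 : String) : Int :=
  (PySem.List.pyRange 0 ((PySem.Str.lower s1).toList.length : Int) 1).foldl
    (fun a i => if PySem.List.pyGet? (PySem.Str.lower s1).toList i
                 = PySem.List.pyGet? (PySem.Str.lower s2).toList i then a + 1 else a) 0

def solution (s : String) (l : List String) : List String :=
  (l.foldl
    (fun (st : List String × Int) x =>
      let diff := pyDifferent s x
      if diff > st.2 then ([x], diff)
      else if diff = st.2 then (st.1 ++ [x], st.2)
      else st)
    ([], 0)).1

-- ===== PORT B =====
-- sum(a == b for a, b in zip(t, x.lower()))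
def scoreB (t : List Char) (x : String) : Int :=
  (t.zip (PySem.Str.lower x).toList).foldl (fun a p => a + (if p.1 = p.2 then 1 else 0)) 0

def solution_alt (s : String) (l : List String) : List String :=
  let t := (PySem.Str.lower s).toList
  let scores := l.map (fun x => scoreB t x)
  if l = [] then []
  else
    match PySem.List.max? scores (fun y => y) with  -- max(scores); none branch unreachable since l ≠ []
    | none => []
    | some best => ((l.zip scores).filter (fun p => p.2 == best)).map (fun p => p.1)

-- ===== PRECONDITION & SPEC =====
-- Pre_ excludes exactly the inputs where A raises IndexError: some string in l shorter than s.
def Pre_solution (s : String) (l : List String) : Prop := ∀ x ∈ l, s.length ≤ x.length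
instance (s : String) (l : List String) : Decidable (Pre_solution s l) := by unfold Pre_solution; infer_instance
def pvWitness_solution : String × List String := ("ab", ["aB", "cd", "abc"])


def Spec_solution (s : String) (l : List String) (out : List String) : Prop := out = solution_alt s l
instance (s : String) (l : List String) (out : List String) : Decidable (Spec_solution s l out) := by unfold Spec_solution; infer_instance

-- ===== CLAIM (what is proved, stated in full; the proofs are below) =====
def Claim_equal_solution : Prop := ∀ (s : String) (l : List String), Dom_solution s l → Pre_solution s l → Spec_solution s l (solution s l)

-- ===== LEMMAS AND PROOFS =====

-- A's index-based counting loop over range(len u) equals B's zip fold when u is no longer than v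
theorem count_range_eq_zip (u : List Char) :
    ∀ (v : List Char), u.length ≤ v.length → ∀ (a : Int),
      (List.range u.length).foldl (fun (a : Int) (k : Nat) => if u[k]? = v[k]? then a + 1 else a) a
      = (u.zip v).foldl (fun a p => a + (if p.1 = p.2 then 1 else 0)) a := by
  induction u with
  | nil => intro v _ a; simp
  | cons c u ih =>
    intro v hlen a
    cases v with
    | nil => simp at hlen
    | cons d v =>
      simp only [List.length_cons, List.range_succ_eq_map, List.foldl_cons, List.foldl_map,
        List.zip_cons_cons, List.getElem?_cons_zero, Option.some.injEq, List.getElem?_cons_succ,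
        Nat.succ_eq_add_one]
      have hlen' : u.length ≤ v.length := by simpa using hlen
      by_cases hcd : c = d
      · rw [if_pos hcd, if_pos hcd]; exact ih v hlen' (a + 1)
      · rw [if_neg hcd, if_neg hcd]; simpa using ih v hlen' a

theorem length_lower (s : String) : (PySem.Str.lower s).toList.length = s.length := by
  simp [PySem.Str.toList_lower, PySem.Chars.lower]

theorem score_eq (s x : String) (h : s.length ≤ x.length) :
    pyDifferent s x = scoreB (PySem.Str.lower s).toList x := by
  unfold pyDifferent scoreB
  rw [PySem.List.pyRange_one]
  rw [← count_range_eq_zip (PySem.Str.lower s).toList (PySem.Str.lower x).toList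
    (by rw [length_lower, length_lower]; exact h) 0]
  simp only [sub_zero, Int.toNat_natCast, List.foldl_map]
  simp only [zero_add, PySem.List.pyGet?_natCast]

theorem nonneg_fold (zs : List (Char × Char)) :
    ∀ a : Int, a ≤ zs.foldl (fun a p => a + (if p.1 = p.2 then 1 else 0)) a := by
  induction zs with
  | nil => intro a; simp
  | cons p zs ih =>
    intro a
    simp only [List.foldl_cons]
    calc a ≤ a + (if p.1 = p.2 then 1 else 0) := by split_ifs <;> omega
    _ ≤ _ := ih _

theorem scoreB_nonneg (t : List Char) (x : String) : 0 ≤ scoreB t x := nonneg_fold _ 0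

theorem le_foldmax (f : String → Int) (l : List String) :
    ∀ h : Int, h ≤ l.foldl (fun a x => max a (f x)) h := by
  induction l with
  | nil => intro h; simp
  | cons x l ih =>
    intro h
    simp only [List.foldl_cons]
    exact le_trans (le_max_left h (f x)) (ih (max h (f x)))

-- A's loop: the kept list is exactly the elements whose score equals the running maximum
theorem fst_foldA (f : String → Int) (l : List String) :
    ∀ (ans : List String) (h : Int),
      (l.foldl (fun (st : List String × Int) x =>
        if f x > st.2 then ([x], f x)
        else if f x = st.2 then (st.1 ++ [x], st.2) else st) (ans, h)).1
      = (if l.foldl (fun a x => max a (f x)) h = h then ans else [])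
        ++ l.filter (fun x => decide (f x = l.foldl (fun a x => max a (f x)) h)) := by
  induction l with
  | nil => intro ans h; simp
  | cons x l ih =>
    intro ans h
    simp only [List.foldl_cons, List.filter_cons]
    rcases lt_trichotomy h (f x) with hlt | heq | hgt
    · simp only [show max h (f x) = f x by omega]
      rw [if_pos (show f x > h by omega), ih [x] (f x)]
      have hle := le_foldmax f l (f x)
      by_cases he : l.foldl (fun a x => max a (f x)) (f x) = f x
      · rw [if_pos he, if_neg (show ¬ l.foldl (fun a x => max a (f x)) (f x) = h by omega)]
        simp [he]
      · have hne : ¬ (f x = l.foldl (fun a x => max a (f x)) (f x)) := fun hc => he hc.symm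
        rw [if_neg he, if_neg (show ¬ l.foldl (fun a x => max a (f x)) (f x) = h by omega)]
        simp [hne]
    · simp only [show max h (f x) = h by omega]
      rw [if_neg (show ¬ f x > h by omega), if_pos heq.symm, ih (ans ++ [x]) h]
      by_cases he : l.foldl (fun a x => max a (f x)) h = h
      · have hfx : f x = l.foldl (fun a x => max a (f x)) h := by omega
        simp [he, hfx]
      · have hfx : ¬ (f x = l.foldl (fun a x => max a (f x)) h) := by
          have := le_foldmax f l h; omega
        simp [he, hfx]
    · simp only [show max h (f x) = h by omega]
      rw [if_neg (show ¬ f x > h by omega), if_neg (show ¬ f x = h by omega), ih ans h]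
      have hle := le_foldmax f l h
      have hfx : ¬ (f x = l.foldl (fun a x => max a (f x)) h) := by omega
      simp [hfx]

theorem zip_filter_map (g : String → Int) (best : Int) (l : List String) :
    ((l.zip (l.map (fun x => g x))).filter (fun p => p.2 == best)).map (fun p => p.1)
    = l.filter (fun x => g x == best) := by
  induction l with
  | nil => rfl
  | cons x l ih =>
    simp only [List.map_cons, List.zip_cons_cons, List.filter_cons]
    by_cases hb : ((g x : Int) == best) = true <;> simp [hb, ih]

theorem zip_filter_map_cons (g : String → Int) (best : Int) (y : String) (l : List String) :
    (((y :: l).zip (g y :: l.map (fun x => g x))).filter (fun p => p.2 == best)).map (fun p => p.1)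
    = (y :: l).filter (fun x => g x == best) := by
  have h := zip_filter_map g best (y :: l)
  rw [List.map_cons] at h
  exact h

-- B's tail (nonempty check, max, zip-filter comprehension) equals the max-filter form of A's loop result
theorem B_side (g : String → Int) (hg0 : ∀ x, 0 ≤ g x) (l : List String) :
    (if l.foldl (fun a x => max a (g x)) 0 = 0 then ([] : List String) else [])
      ++ l.filter (fun x => decide (g x = l.foldl (fun a x => max a (g x)) 0))
    = (if l = [] then []
       else match PySem.List.max? (l.map (fun x => g x)) (fun y => y) with
            | none => []
            | some best => ((l.zip (l.map (fun x => g x))).filter (fun p => p.2 == best)).map (fun p => p.1)) := by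
  cases l with
  | nil => simp
  | cons y l' =>
    simp only [List.map_cons, if_neg (List.cons_ne_nil y l'), PySem.List.max?_id_cons]
    rw [zip_filter_map_cons g]
    have hbest : (l'.map (fun x => g x)).foldl max (g y)
        = (y :: l').foldl (fun a x => max a (g x)) 0 := by
      rw [List.foldl_map]
      simp only [List.foldl_cons]
      rw [show max 0 (g y) = g y by have := hg0 y; omega]
    rw [hbest]
    have hnil : (if (y :: l').foldl (fun a x => max a (g x)) 0 = 0 then ([] : List String) else []) = [] := by
      split <;> rfl
    rw [hnil, List.nil_append]
    apply List.filter_congr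
    intro x _
    have hdb : ∀ (a b : Int), decide (a = b) = (a == b) := fun a b => by
      by_cases h : a = b <;> simp [h]
    exact hdb _ _

-- ===== VERDICT (by name: the statement is the Claim_ definition above) =====
theorem solution_spec : Claim_equal_solution := by
  intro s l _ hpre
  unfold Spec_solution
  have hA : solution s l
      = (l.foldl (fun (st : List String × Int) x =>
          if pyDifferent s x > st.2 then ([x], pyDifferent s x)
          else if pyDifferent s x = st.2 then (st.1 ++ [x], st.2) else st) ([], 0)).1 := rfl
  have hfg : ∀ x ∈ l, pyDifferent s x = scoreB (PySem.Str.lower s).toList x :=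
    fun x hx => score_eq s x (hpre x hx)
  rw [hA, PySem.List.foldl_congr_mem l
    (fun (st : List String × Int) x =>
      if pyDifferent s x > st.2 then ([x], pyDifferent s x)
      else if pyDifferent s x = st.2 then (st.1 ++ [x], st.2) else st)
    (fun (st : List String × Int) x =>
      if scoreB (PySem.Str.lower s).toList x > st.2 then ([x], scoreB (PySem.Str.lower s).toList x)
      else if scoreB (PySem.Str.lower s).toList x = st.2 then (st.1 ++ [x], st.2) else st)
    ([], 0) (by intro acc x hx; dsimp only; rw [hfg x hx])]
  rw [fst_foldA (fun x => scoreB (PySem.Str.lower s).toList x) l [] 0]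
  rw [B_side (fun x => scoreB (PySem.Str.lower s).toList x)
    (fun x => scoreB_nonneg (PySem.Str.lower s).toList x) l]
  rfl
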